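-- pv_equiv track=rewrite | github.com/gigo-gigo/atcoder | abc/abc442/d.py | solve
-- ===== SOURCE A (Python) =====
-- from itertools import accumulate
--
-- def solve(N, A, queries):
--     accA = list(accumulate(A, initial=0))
--     ans = []
--     for c, left, right in queries:
--         if c == 1:
--             accA[left + 1] += -A[left] + A[left + 1]
--             A[left], A[left + 1] = A[left + 1], A[left]
--         else:
--             x = accA[right] - accA[left]
--             ans.append(x)
--
--     return ans
-- ===== SOURCE B (Python) =====
-- from itertools import accumulate
--
-- def solve(N, A, queries):
--     ans = []
--     for c, left, right in queries:
--         if c == 1: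
--             A[left], A[left + 1] = A[left + 1], A[left]
--         else:
--             acc = list(accumulate(A, initial=0))
--             ans.append(acc[right] - acc[left])
--     return ans
-- ===== Notes on version B (the rewrite author's own statement) =====
-- stated objective: simpler
-- what changed: Drops the precomputed prefix-sum array and its incremental O(1) maintenance on every swap; each range-sum query instead rebuilds the prefix sums of the live array on the spot and differences them, so the only state carried across queries is the array itself.
-- outside the precondition, e.g. on solve(3, [1, 2, 3], [(1, -2, 0), (2, 0, 3)]): A returns [7], B returns [6]
import Mathlib
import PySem

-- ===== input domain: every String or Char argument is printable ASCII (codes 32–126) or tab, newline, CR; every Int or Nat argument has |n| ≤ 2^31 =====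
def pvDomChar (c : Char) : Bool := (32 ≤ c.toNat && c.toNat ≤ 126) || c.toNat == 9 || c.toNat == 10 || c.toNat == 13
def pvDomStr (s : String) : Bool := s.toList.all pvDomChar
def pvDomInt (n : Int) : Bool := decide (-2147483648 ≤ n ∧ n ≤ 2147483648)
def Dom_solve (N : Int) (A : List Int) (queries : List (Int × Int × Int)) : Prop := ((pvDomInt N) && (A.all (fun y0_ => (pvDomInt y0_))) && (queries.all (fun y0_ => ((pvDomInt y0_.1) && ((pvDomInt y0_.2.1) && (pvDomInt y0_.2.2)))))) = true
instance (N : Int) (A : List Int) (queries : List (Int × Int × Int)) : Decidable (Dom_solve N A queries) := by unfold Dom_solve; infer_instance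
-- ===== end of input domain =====

-- B drops the maintained prefix-sum array: the only state carried across queries is the
-- live array, and each range-sum query rebuilds its prefix sums on the spot (objective:
-- simpler).  Both Pythons swap elements of the argument list A in place; the equivalence
-- proved here is about the RETURN value only.

-- ===== PORT A =====
def solveAccLoop : List (Int × Int × Int) → List Int → List Int → List Int → List Int
  | [], _, _, ans => ans
  | (c, left, right) :: qs, accA, A, ans =>
    if c = 1 then
      let al  := PySem.List.pyGetD A left 0
      let al1 := PySem.List.pyGetD A (left + 1) 0
      let accA' := PySem.List.pySetD accA (left + 1)
        (PySem.List.pyGetD accA (left + 1) 0 + (-al + al1))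
      let A' := PySem.List.pySetD (PySem.List.pySetD A left al1) (left + 1) al
      solveAccLoop qs accA' A' ans
    else
      solveAccLoop qs accA A
        (ans ++ [PySem.List.pyGetD accA right 0 - PySem.List.pyGetD accA left 0])

def solve (N : Int) (A : List Int) (queries : List (Int × Int × Int)) : List Int :=
  solveAccLoop queries (List.scanl (· + ·) 0 A) A []

-- ===== PORT B =====
-- one query transforms the state (live array, answers so far)
def altStep (st : List Int × List Int) (q : Int × Int × Int) : List Int × List Int :=
  if q.1 = 1 then
    (PySem.List.pySetD
       (PySem.List.pySetD st.1 q.2.1 (PySem.List.pyGetD st.1 (q.2.1 + 1) 0))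
       (q.2.1 + 1) (PySem.List.pyGetD st.1 q.2.1 0),
     st.2)
  else
    let acc := List.scanl (· + ·) 0 st.1
    (st.1, st.2 ++ [PySem.List.pyGetD acc q.2.2 0 - PySem.List.pyGetD acc q.2.1 0])

def solve_alt (N : Int) (A : List Int) (queries : List (Int × Int × Int)) : List Int :=
  (queries.foldl altStep (A, [])).2

-- ===== PRECONDITION & SPEC =====
-- Pre_ admits exactly the inputs on which A returns (all indices in Python's wraparound
-- range), except that it also excludes range-sum (type-2) queries that come after a swap
-- (type-1) at a negative index: such a swap updates the wrong slot of A's prefix array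
-- through negative-index wraparound, and the prefix-difference A then returns is an
-- accidental value no specification would pin down.
def Pre_solve (N : Int) (A : List Int) (queries : List (Int × Int × Int)) : Prop :=
  (∀ q ∈ queries,
    if q.1 = 1 then -(A.length : Int) ≤ q.2.1 ∧ q.2.1 ≤ (A.length : Int) - 2
    else -((A.length : Int) + 1) ≤ q.2.1 ∧ q.2.1 ≤ (A.length : Int) ∧
         -((A.length : Int) + 1) ≤ q.2.2 ∧ q.2.2 ≤ (A.length : Int)) ∧
  queries.Pairwise (fun p q => p.1 = 1 → p.2.1 < 0 → q.1 = 1)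

instance (N : Int) (A : List Int) (queries : List (Int × Int × Int)) : Decidable (Pre_solve N A queries) := by
  unfold Pre_solve; infer_instance

def pvWitness_solve : Int × List Int × (List (Int × Int × Int)) :=
  (3, [5, -2, 7], [(2, 0, 3), (1, 0, 0), (2, -1, -4), (1, 1, 0), (2, 1, 3), (1, -1, 0)])

def Spec_solve (N : Int) (A : List Int) (queries : List (Int × Int × Int)) (out : List Int) : Prop := out = solve_alt N A queries
instance (N : Int) (A : List Int) (queries : List (Int × Int × Int)) (out : List Int) : Decidable (Spec_solve N A queries out) := by unfold Spec_solve; infer_instance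

-- ===== CLAIM (what is proved, stated in full; the proofs are below) =====
def Claim_equal_solve : Prop := ∀ (N : Int) (A : List Int) (queries : List (Int × Int × Int)), Dom_solve N A queries → Pre_solve N A queries → Spec_solve N A queries (solve N A queries)

-- ===== LEMMAS AND PROOFS =====

theorem set_set_swap (pre rest : List Int) (a b a' b' : Int) :
    ((pre ++ a :: b :: rest).set pre.length b').set (pre.length + 1) a' = pre ++ b' :: a' :: rest := by
  induction pre with
  | nil => rfl
  | cons x l ih => simpa using ih

theorem sum_take_swap (P R : List Int) (a b : Int) (k : Nat) :
    ((P ++ b :: a :: R).take k).sum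
      = ((P ++ a :: b :: R).take k).sum + (if k = P.length + 1 then b - a else 0) := by
  rw [List.take_append, List.take_append]
  rcases Nat.lt_or_ge k (P.length + 1) with h | h
  · rw [if_neg (by omega)]
    have h0 : k - P.length = 0 := by omega
    simp [h0]
  · rcases Nat.lt_or_ge k (P.length + 2) with h2 | h2
    · rw [if_pos (by omega)]
      have h1 : k - P.length = 1 := by omega
      simp [h1]
    · rw [if_neg (by omega)]
      have h3 : k - P.length = (k - P.length - 2) + 2 := by omega
      rw [h3]
      simp [List.take_succ_cons]; ring

theorem scanl_sum (A : List Int) (s : Int) (k : Nat) (hk : k ≤ A.length) :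
    (List.scanl (· + ·) s A)[k]? = some (s + (A.take k).sum) := by
  induction A generalizing s k with
  | nil => simp_all
  | cons a t ih =>
    cases k with
    | zero => simp [List.scanl_cons]
    | succ k =>
      rw [List.scanl_cons]
      simp only [List.getElem?_cons_succ, List.take_succ_cons, List.sum_cons]
      rw [ih (s + a) k (by simpa using hk)]
      ring_nf

theorem decomp_two (A : List Int) (l : Nat) (h : l + 1 < A.length) :
    A = A.take l ++ A[l] :: A[l + 1] :: A.drop (l + 2) := by
  conv_lhs => rw [← List.take_append_drop l A]
  congr 1
  rw [List.drop_eq_getElem_cons (by omega), List.drop_eq_getElem_cons (by omega)]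

theorem pySetD_int (A : List Int) (i : Int) (h : 0 ≤ i) (v : Int) :
    PySem.List.pySetD A i v = A.set i.toNat v := by
  obtain ⟨n, rfl⟩ : ∃ n : Nat, i = (n : Int) := ⟨i.toNat, (Int.toNat_of_nonneg h).symm⟩
  simp

theorem set_set_eq (A : List Int) (l : Nat) (h : l + 1 < A.length) (v0 v1 : Int) :
    (A.set l v1).set (l + 1) v0 = A.take l ++ v1 :: v0 :: A.drop (l + 2) := by
  conv_lhs => rw [decomp_two A l h]
  have hpl : (A.take l).length = l := by simp; omega
  have h2 := set_set_swap (A.take l) (A.drop (l + 2)) A[l] A[l + 1] v0 v1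
  rw [hpl] at h2
  exact h2

-- the incremental accA update on an in-range swap keeps accA the exact prefix-sum list
theorem scanl_swap (A : List Int) (ln : Nat) (h : ln + 1 < A.length) :
    (List.scanl (· + ·) 0 A).set (ln + 1) ((A.take (ln + 1)).sum + (-A[ln] + A[ln + 1]))
      = List.scanl (· + ·) 0 (A.take ln ++ A[ln + 1] :: A[ln] :: A.drop (ln + 2)) := by
  have hpl : (A.take ln).length = ln := by simp; omega
  have hlenA' : (A.take ln ++ A[ln + 1] :: A[ln] :: A.drop (ln + 2)).length = A.length := by
    simp; omega
  apply List.ext_getElem?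
  intro k
  rw [List.getElem?_set]
  rcases Nat.lt_or_ge k (A.length + 1) with hk | hk
  · have hsum : ((A.take ln ++ A[ln + 1] :: A[ln] :: A.drop (ln + 2)).take k).sum
        = (A.take k).sum + (if k = ln + 1 then A[ln + 1] - A[ln] else 0) := by
      have hdec := decomp_two A ln h
      have h6 := sum_take_swap (A.take ln) (A.drop (ln + 2)) A[ln] A[ln + 1] k
      rw [hpl] at h6
      rw [← hdec] at h6
      exact h6
    rw [scanl_sum _ _ _ (by omega : k ≤ (A.take ln ++ A[ln + 1] :: A[ln] :: A.drop (ln + 2)).length)]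
    rw [hsum]
    by_cases hk1 : k = ln + 1
    · rw [if_pos hk1.symm, if_pos (by rw [List.length_scanl]; omega), if_pos hk1]
      subst hk1
      have hsplit : (A.take (ln + 1)).sum = (A.take ln).sum + A[ln] :=
        List.sum_take_succ _ _ (by omega)
      congr 1
      rw [hsplit]; ring
    · rw [if_neg (fun hx => hk1 hx.symm), if_neg hk1]
      rw [scanl_sum A 0 k (by omega)]
      simp
  · rw [if_neg (by omega)]
    rw [List.getElem?_eq_none (by rw [List.length_scanl]; omega),
        List.getElem?_eq_none (by rw [List.length_scanl]; omega)]

theorem accLoop_allT1 (qs : List (Int × Int × Int)) (accA A ans : List Int)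
    (h : ∀ q ∈ qs, q.1 = 1) : solveAccLoop qs accA A ans = ans := by
  induction qs generalizing accA A with
  | nil => rfl
  | cons q qs ih =>
    obtain ⟨c, l, r⟩ := q
    rw [solveAccLoop, if_pos (h _ (List.mem_cons_self ..))]
    exact ih _ _ (fun q hq => h _ (List.mem_cons_of_mem _ hq))

theorem altFold_allT1 (qs : List (Int × Int × Int)) (A ans : List Int)
    (h : ∀ q ∈ qs, q.1 = 1) : (qs.foldl altStep (A, ans)).2 = ans := by
  induction qs generalizing A with
  | nil => rfl
  | cons q qs ih =>
    rw [List.foldl_cons, altStep, if_pos (h _ (List.mem_cons_self ..))]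
    exact ih _ (fun q hq => h _ (List.mem_cons_of_mem _ hq))

theorem loop_eq (qs : List (Int × Int × Int)) (accA A ans : List Int)
    (hacc : accA = List.scanl (· + ·) 0 A)
    (hq : ∀ q ∈ qs, if q.1 = 1 then -(A.length : Int) ≤ q.2.1 ∧ q.2.1 ≤ (A.length : Int) - 2
          else -((A.length : Int) + 1) ≤ q.2.1 ∧ q.2.1 ≤ (A.length : Int) ∧
               -((A.length : Int) + 1) ≤ q.2.2 ∧ q.2.2 ≤ (A.length : Int))
    (hpw : qs.Pairwise (fun p q => p.1 = 1 → p.2.1 < 0 → q.1 = 1)) :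
    solveAccLoop qs accA A ans = (qs.foldl altStep (A, ans)).2 := by
  induction qs generalizing accA A ans with
  | nil => rfl
  | cons q qs ih =>
    obtain ⟨c, l, r⟩ := q
    have hq0 := hq _ (List.mem_cons_self ..)
    by_cases hc : c = 1
    · -- swap branch
      simp only [hc, if_pos] at hq0
      obtain ⟨hlo, hhi⟩ := hq0
      rcases Int.lt_or_le l 0 with hneg | hl0
      · -- negative swap index: everything after is a swap, so both sides keep ans
        have hall : ∀ q ∈ qs, q.1 = 1 := fun q hmem =>
          (List.pairwise_cons.mp hpw).1 q hmem hc hneg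
        rw [solveAccLoop, List.foldl_cons, altStep, if_pos hc, if_pos hc]
        rw [accLoop_allT1 _ _ _ _ hall, altFold_allT1 _ _ _ hall]
      have hl1 : l + 1 < (A.length : Int) := by omega
      set ln := l.toNat with hln
      have hlt : ln + 1 < A.length := by omega
      simp only [solveAccLoop, List.foldl_cons, altStep, hc, reduceIte]
      have hidx1 : (l + 1).toNat = ln + 1 := by omega
      have hgl : PySem.List.pyGetD A l 0 = A[ln] := by
        rw [PySem.List.pyGetD_eq_getElem A 0 hl0 (by omega)]
      have hgl1 : PySem.List.pyGetD A (l + 1) 0 = A[ln + 1] := by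
        rw [PySem.List.pyGetD_eq_getElem A 0 (by omega) (by omega)]
        simp only [hidx1]
      have hga : PySem.List.pyGetD accA (l + 1) 0 = (A.take (ln + 1)).sum := by
        rw [PySem.List.pyGetD_eq_getElem accA 0 (by omega)
          (by rw [hacc, List.length_scanl]; omega)]
        simp only [hidx1]
        have h5 : accA[ln + 1]? = some ((A.take (ln + 1)).sum) := by
          rw [hacc]
          simpa using scanl_sum A 0 (ln + 1) (by omega)
        exact Option.some.inj (by rw [← h5, List.getElem?_eq_getElem])
      have hA' : PySem.List.pySetD (PySem.List.pySetD A l A[ln + 1]) (l + 1) A[ln]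
          = A.take ln ++ A[ln + 1] :: A[ln] :: A.drop (ln + 2) := by
        rw [pySetD_int A l hl0, pySetD_int _ _ (by omega : (0:Int) ≤ l + 1), hidx1]
        exact set_set_eq A ln hlt A[ln] A[ln + 1]
      have hacc' : PySem.List.pySetD accA (l + 1) (PySem.List.pyGetD accA (l + 1) 0 + (-A[ln] + A[ln + 1]))
          = List.scanl (· + ·) 0 (A.take ln ++ A[ln + 1] :: A[ln] :: A.drop (ln + 2)) := by
        rw [hga, pySetD_int _ _ (by omega : (0:Int) ≤ l + 1), hidx1, hacc]
        exact scanl_swap A ln hlt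
      rw [hgl, hgl1, hA', hacc']
      set A' := A.take ln ++ A[ln + 1] :: A[ln] :: A.drop (ln + 2) with hA'def
      have hlenA' : A'.length = A.length := by
        rw [hA'def]; simp; omega
      apply ih
      · rfl
      · intro q hqmem
        have := hq _ (List.mem_cons_of_mem _ hqmem)
        rwa [hlenA']
      · exact (List.pairwise_cons.mp hpw).2
    · -- query branch: accA is exactly the prefix list B rebuilds from the live array
      simp only [solveAccLoop, List.foldl_cons, altStep, if_neg hc]
      rw [hacc]
      exact ih _ _ _ rfl (fun q h => hq _ (List.mem_cons_of_mem _ h))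
        (List.pairwise_cons.mp hpw).2

-- ===== VERDICT (by name: the statement is the Claim_ definition above) =====
theorem solve_spec : Claim_equal_solve := by
  intro N A queries _hdom hpre
  unfold Spec_solve solve solve_alt
  exact loop_eq queries _ A [] rfl (fun q hq => hpre.1 q hq) hpre.2
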